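-- pv_equiv track=rewrite | github.com/ikeshou/Kyoupuro_library_python | 1_basic_algorithms/4_syakutori.py | intervals_lt_x
-- ===== SOURCE A (Python) =====
-- from typing import List, Tuple, Union
--
-- Num = Union[int, float]
--
-- def intervals_lt_x(L: List[Num], x: Num) -> Tuple[int, int, List[Tuple[int]]]:
--     """
--     正の数列 L の全区間について、区間和が x 以下であるようなものを O(n) で探索する。
--     満足する区間の数と、そのうち最長の区間のサイズ、最長の区間全てのリストを返す。
--
--     Args:
--         L (list)
--         x (number)
--
--     Returns:
--         cnt (int): 区間和が x 以下であった区間の総数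
--         width (int): 最長の区間の幅
--         longest_intervals (list): 最長の区間全てのリスト (半開区間)
--
--     Examples:
--         >>> intervals_lt_x([6, 3, 8, 1, 10], 12)
--         (10, 3, [(1, 4)])
--     """
--     assert(all(map(lambda x:x>=0, L)))
--     n = len(L)
--     cnt, max_width, longest_intervals = 0, 0, []    # 満足する区間の数、そのうち最長の区間のサイズ、最長の区間全てのリストをここに保存して最後に返す
--     right_end = 0
--     summation = 0
--     for left in range(0, n):
--         # 終了時に summation は sum(L[left:right_end]) を表す。
--         # [left, right_end) は (left を左端に固定した時の) 最長インターバルとなる。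
--         while right_end < n and summation + L[right_end] <= x:
--             summation += L[right_end]
--             right_end += 1
--         size = right_end - left
--         # cnt への加算。[left:left] ... [left:right_end] が left を左端点とした時の条件を満たす区間である。
--         cnt += size
--         # max_width, logest_intervals のメモ
--         if max_width < size:
--             max_width = size
--             longest_intervals = [(left, right_end)]
--         elif max_width == size:
--             longest_intervals.append((left, right_end))
--
--         # 尺取りで完全に区間が潰れたら right_end も動かす
--         if right_end == left:
--             right_end += 1
--         else:
--             summation -= L[left]
--     return cnt, max_width, longest_intervals
-- ===== SOURCE B (Python) =====
-- from typing import List, Tuple, Union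
--
-- Num = Union[int, float]
--
-- def _bisect_right(a, v, lo, hi):
--     while lo < hi:
--         mid = (lo + hi) // 2
--         if v < a[mid]:
--             hi = mid
--         else:
--             lo = mid + 1
--     return lo
--
-- def intervals_lt_x(L: List[Num], x: Num) -> Tuple[int, int, List[Tuple[int]]]:
--     assert(all(map(lambda x: x >= 0, L)))
--     n = len(L)
--     # prefix sums: P[i] = sum(L[:i])
--     P = []
--     acc = 0
--     for v in L:
--         P.append(acc)
--         acc += v
--     P.append(acc)
--     cnt, max_width, longest_intervals = 0, 0, []
--     for left in range(n):
--         # largest r with P[r] <= P[left] + x, clamped up to left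
--         right_end = _bisect_right(P, P[left] + x, 0, n + 1) - 1
--         if right_end < left:
--             right_end = left
--         size = right_end - left
--         cnt += size
--         if max_width < size:
--             max_width = size
--             longest_intervals = [(left, right_end)]
--         elif max_width == size:
--             longest_intervals.append((left, right_end))
--     return cnt, max_width, longest_intervals
-- ===== Notes on version B (the rewrite author's own statement) =====
-- stated objective: alternative
-- what changed: Replaces the incremental two-pointer (sliding-window) scan with a prefix-sum array plus, for each left endpoint, a hand-written binary search (bisect_right) for the furthest right endpoint; no running window sum or carried right pointer remains.
import Mathlib
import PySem

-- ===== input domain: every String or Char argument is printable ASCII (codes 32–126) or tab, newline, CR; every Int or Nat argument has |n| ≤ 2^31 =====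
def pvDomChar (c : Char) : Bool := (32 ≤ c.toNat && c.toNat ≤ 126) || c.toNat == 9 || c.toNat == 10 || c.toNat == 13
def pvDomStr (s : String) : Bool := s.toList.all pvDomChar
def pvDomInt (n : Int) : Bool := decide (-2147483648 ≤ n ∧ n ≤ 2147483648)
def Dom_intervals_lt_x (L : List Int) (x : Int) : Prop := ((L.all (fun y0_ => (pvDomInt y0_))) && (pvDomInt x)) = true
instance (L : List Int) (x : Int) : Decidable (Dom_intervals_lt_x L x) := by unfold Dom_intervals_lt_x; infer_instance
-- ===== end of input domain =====

-- B replaces A's two-pointer sliding window by a prefix-sum array with a binary search per left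
-- endpoint: a different algorithm of similar cost (alternative, not claimed faster).

-- ===== PORT A =====
-- A's inner `while right_end < n and summation + L[right_end] <= x` loop.
def aWhile (L : List Int) (x : Int) (n re : Nat) (s : Int) : Nat × Int :=
  if h : re < n ∧ s + L.getD re 0 ≤ x then
    aWhile L x n (re + 1) (s + L.getD re 0)
  else (re, s)
termination_by n - re
decreasing_by omega

-- one iteration of A's `for left in range(0, n)` loop; state = (cnt, max_width, longest_intervals, right_end, summation)
def aStep (L : List Int) (x : Int) (n : Nat)
    (st : Int × Int × List (Int × Int) × Nat × Int) (left : Nat) :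
    Int × Int × List (Int × Int) × Nat × Int :=
  match st with
  | (cnt, mw, ivs, re0, s0) =>
    let ws := aWhile L x n re0 s0
    let re := ws.1
    let s := ws.2
    let size : Int := (re : Int) - (left : Int)
    let cnt' := cnt + size
    let mw' := if mw < size then size else mw
    let ivs' := if mw < size then [((left : Int), (re : Int))]
                else if mw = size then ivs ++ [((left : Int), (re : Int))]
                else ivs
    if re = left then (cnt', mw', ivs', re + 1, s)
    else (cnt', mw', ivs', re, s - L.getD left 0)

def intervals_lt_x (L : List Int) (x : Int) : Int × Int × (List (Int × Int)) :=
  let n := L.length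
  let r := (List.range n).foldl (aStep L x n) (0, 0, [], 0, 0)
  (r.1, r.2.1, r.2.2.1)

-- ===== PORT B =====
-- prefix sums: emits the running total before each element, plus the final total (Source B's P)
def prefixFrom (s : Int) : List Int → List Int
  | [] => [s]
  | v :: t => s :: prefixFrom (s + v) t

-- Source B's hand-written _bisect_right(a, v, lo, hi)
def bsr (a : List Int) (v : Int) (lo hi : Nat) : Nat :=
  if _h : lo < hi then
    let mid := (lo + hi) / 2
    if v < a.getD mid 0 then bsr a v lo mid else bsr a v (mid + 1) hi
  else lo
termination_by hi - lo
decreasing_by all_goals omega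

-- one iteration of Source B's `for left in range(n)` loop; state = (cnt, max_width, longest_intervals)
def bStep (n : Nat) (P : List Int) (x : Int)
    (st : Int × Int × List (Int × Int)) (left : Nat) : Int × Int × List (Int × Int) :=
  match st with
  | (cnt, mw, ivs) =>
    let b := bsr P (P.getD left 0 + x) 0 (n + 1)
    -- Python computes b - 1 (possibly -1) and then clamps it up to left; with Nat subtraction `max left (b - 1)` is that same value
    let re := max left (b - 1)
    let size : Int := (re : Int) - (left : Int)
    let cnt' := cnt + size
    let mw' := if mw < size then size else mw
    let ivs' := if mw < size then [((left : Int), (re : Int))]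
                else if mw = size then ivs ++ [((left : Int), (re : Int))]
                else ivs
    (cnt', mw', ivs')

def intervals_lt_x_alt (L : List Int) (x : Int) : Int × Int × (List (Int × Int)) :=
  let n := L.length
  let P := prefixFrom 0 L
  (List.range n).foldl (bStep n P x) (0, 0, [])

-- ===== PRECONDITION & SPEC =====
-- A's `assert(all(map(lambda x: x >= 0, L)))` raises AssertionError on any negative element; Pre_ excludes exactly those inputs.
def Pre_intervals_lt_x (L : List Int) (x : Int) : Prop := ∀ a ∈ L, 0 ≤ a
instance (L : List Int) (x : Int) : Decidable (Pre_intervals_lt_x L x) := by unfold Pre_intervals_lt_x; infer_instance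
def pvWitness_intervals_lt_x : List Int × Int := ([6, 3, 8, 1, 10], 12)

def Spec_intervals_lt_x (L : List Int) (x : Int) (out : Int × Int × (List (Int × Int))) : Prop := out = intervals_lt_x_alt L x
instance (L : List Int) (x : Int) (out : Int × Int × (List (Int × Int))) : Decidable (Spec_intervals_lt_x L x out) := by unfold Spec_intervals_lt_x; infer_instance

-- ===== CLAIM (what is proved, stated in full; the proofs are below) =====
def Claim_equal_intervals_lt_x : Prop := ∀ (L : List Int) (x : Int), Dom_intervals_lt_x L x → Pre_intervals_lt_x L x → Spec_intervals_lt_x L x (intervals_lt_x L x)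

-- ===== LEMMAS AND PROOFS =====

-- sum of the first i elements
def psum (L : List Int) (i : Nat) : Int := (L.take i).sum

theorem psum_succ : ∀ (L : List Int) (i : Nat), i < L.length →
    psum L (i + 1) = psum L i + L.getD i 0
  | [], i, h => by simp at h
  | v :: t, 0, _ => by simp [psum]
  | v :: t, (i + 1), h => by
    have := psum_succ t i (by simpa using h)
    simp only [psum, List.take_succ_cons, List.sum_cons, List.getD_cons_succ] at this ⊢
    omega

theorem psum_mono (L : List Int) (hPre : ∀ a ∈ L, 0 ≤ a) :
    ∀ i j : Nat, i ≤ j → j ≤ L.length → psum L i ≤ psum L j := by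
  intro i j hij hj
  induction j with
  | zero =>
    have h0 : i = 0 := by omega
    subst h0
    exact le_refl _
  | succ k ih =>
    rcases Nat.lt_or_ge i (k+1) with h | h
    · have hk : k < L.length := by omega
      have : psum L i ≤ psum L k := ih (by omega) (by omega)
      have hmem : L.getD k 0 ∈ L := by
        rw [List.getD_eq_getElem?_getD, List.getElem?_eq_getElem hk]
        simpa using List.getElem_mem hk
      have := hPre _ hmem
      rw [psum_succ L k hk]; omega
    · have : i = k + 1 := by omega
      subst this; exact le_refl _

theorem prefixFrom_length (s : Int) (L : List Int) : (prefixFrom s L).length = L.length + 1 := by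
  induction L generalizing s with
  | nil => simp [prefixFrom]
  | cons v t ih => simp [prefixFrom, ih]

theorem prefixFrom_getD (L : List Int) : ∀ (s : Int) (i : Nat), i ≤ L.length →
    (prefixFrom s L).getD i 0 = s + psum L i := by
  induction L with
  | nil =>
    intro s i h
    have h0 : i = 0 := by simp at h; omega
    subst h0; simp [prefixFrom, psum]
  | cons v t ih =>
    intro s i h
    cases i with
    | zero => simp [prefixFrom, psum]
    | succ k =>
      have := ih (s + v) k (by simpa using h)
      simp only [prefixFrom, List.getD_cons_succ, this, psum, List.take_succ_cons, List.sum_cons]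
      ring

theorem bsr_spec (P : List Int) (v : Int)
    (hmono : ∀ i j : Nat, i ≤ j → j < P.length → P.getD i 0 ≤ P.getD j 0) :
    ∀ (k lo hi : Nat), hi - lo ≤ k → lo ≤ hi → hi ≤ P.length →
    (∀ j, j < lo → P.getD j 0 ≤ v) → (∀ j, hi ≤ j → j < P.length → v < P.getD j 0) →
    lo ≤ bsr P v lo hi ∧ bsr P v lo hi ≤ hi ∧
      ∀ j, j < P.length → (P.getD j 0 ≤ v ↔ j < bsr P v lo hi) := by
  intro k
  induction k with
  | zero =>
    intro lo hi hk hle hhi H1 H2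
    have : lo = hi := by omega
    subst this
    rw [bsr]; simp only [lt_irrefl, dite_false]
    refine ⟨le_refl _, le_refl _, ?_⟩
    intro j hj
    constructor
    · intro hle2
      by_contra hge
      exact absurd hle2 (not_le.mpr (H2 j (by omega) hj))
    · intro hlt; exact H1 j hlt
  | succ k ih =>
    intro lo hi hk hle hhi H1 H2
    rw [bsr]
    by_cases h : lo < hi
    · simp only [h, dite_true]
      have hmidlt : (lo + hi) / 2 < hi := by omega
      have hmidge : lo ≤ (lo + hi) / 2 := by omega
      have hmidlen : (lo + hi) / 2 < P.length := by omega
      by_cases hc : v < P.getD ((lo + hi) / 2) 0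
      · simp only [hc, if_true]
        have := ih lo ((lo + hi) / 2) (by omega) (by omega) (by omega) H1
          (fun j hj hjl => lt_of_lt_of_le hc (hmono _ j hj hjl))
        exact ⟨this.1, le_trans this.2.1 (by omega), this.2.2⟩
      · simp only [hc, if_false]
        push_neg at hc
        have := ih ((lo + hi) / 2 + 1) hi (by omega) (by omega) hhi
          (fun j hj => le_trans (hmono j ((lo + hi) / 2) (by omega) hmidlen) hc) H2
        exact ⟨le_trans (by omega) this.1, this.2.1, this.2.2⟩
    · have heq : lo = hi := by omega
      subst heq
      simp only [lt_irrefl, dite_false]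
      refine ⟨le_refl _, le_refl _, ?_⟩
      intro j hj
      constructor
      · intro hle2
        by_contra hge
        exact absurd hle2 (not_le.mpr (H2 j (by omega) hj))
      · intro hlt; exact H1 j hlt

-- the Source B right-end search for a fixed left
def bval (L : List Int) (x : Int) (l : Nat) : Nat :=
  bsr (prefixFrom 0 L) ((prefixFrom 0 L).getD l 0 + x) 0 (L.length + 1)

def RB (L : List Int) (x : Int) (l : Nat) : Nat := max l (bval L x l - 1)

theorem bval_char (L : List Int) (x : Int) (hPre : ∀ a ∈ L, 0 ≤ a) (l : Nat) (hl : l ≤ L.length) :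
    bval L x l ≤ L.length + 1 ∧
      ∀ j, j ≤ L.length → (psum L j ≤ psum L l + x ↔ j < bval L x l) := by
  have hlen := prefixFrom_length 0 L
  have hl0 : (prefixFrom 0 L).getD l 0 = 0 + psum L l := prefixFrom_getD L 0 l hl
  have hmono : ∀ i j : Nat, i ≤ j → j < (prefixFrom 0 L).length →
      (prefixFrom 0 L).getD i 0 ≤ (prefixFrom 0 L).getD j 0 := by
    intro i j hij hj
    rw [hlen] at hj
    rw [prefixFrom_getD L 0 i (by omega), prefixFrom_getD L 0 j (by omega)]
    have := psum_mono L hPre i j hij (by omega)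
    omega
  unfold bval
  rw [hl0]
  have := bsr_spec (prefixFrom 0 L) (0 + psum L l + x) hmono
    (L.length + 1) 0 (L.length + 1) (by omega) (by omega) (by omega)
    (by omega) (by intro j h1 h2; rw [hlen] at h2; omega)
  refine ⟨this.2.1, ?_⟩
  intro j hj
  have hchar := this.2.2 j (by rw [hlen]; omega)
  rw [prefixFrom_getD L 0 j hj] at hchar
  constructor
  · intro h; exact hchar.mp (by omega)
  · intro h; have := hchar.mpr h; omega

theorem RB_le (L : List Int) (x : Int) (hPre : ∀ a ∈ L, 0 ≤ a) (l : Nat) (hl : l < L.length) :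
    RB L x l ≤ L.length := by
  have := (bval_char L x hPre l (by omega)).1
  unfold RB; omega

theorem RB_mono (L : List Int) (x : Int) (hPre : ∀ a ∈ L, 0 ≤ a) (l : Nat) (hl : l + 1 ≤ L.length) :
    RB L x l ≤ RB L x (l + 1) := by
  have c1 := bval_char L x hPre l (by omega)
  have c2 := bval_char L x hPre (l + 1) hl
  have hb : bval L x l ≤ bval L x (l + 1) := by
    by_contra h
    push_neg at h
    have h1 : bval L x (l + 1) ≤ L.length := by
      by_contra h2
      push_neg at h2
      omega
    have hle : psum L (bval L x (l+1)) ≤ psum L l + x := (c1.2 _ h1).mpr (by omega)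
    have hmono := psum_mono L hPre l (l+1) (by omega) hl
    have : psum L (bval L x (l+1)) ≤ psum L (l+1) + x := by omega
    have := (c2.2 _ h1).mp this
    omega
  unfold RB; omega

theorem aWhile_eq (L : List Int) (x : Int) (hPre : ∀ a ∈ L, 0 ≤ a) (left : Nat)
    (hleft : left < L.length) :
    ∀ (k re : Nat), RB L x left - re ≤ k → left ≤ re → re ≤ RB L x left →
    aWhile L x L.length re (psum L re - psum L left) =
      (RB L x left, psum L (RB L x left) - psum L left) := by
  have hchar := bval_char L x hPre left (by omega)
  have hRBle := RB_le L x hPre left hleft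
  intro k
  induction k with
  | zero =>
    intro re hk h1 h2
    have hre : re = RB L x left := by omega
    subst hre
    rw [aWhile]
    have hcond : ¬ (RB L x left < L.length ∧
        psum L (RB L x left) - psum L left + L.getD (RB L x left) 0 ≤ x) := by
      rintro ⟨hlt, hle⟩
      rw [show psum L (RB L x left) - psum L left + L.getD (RB L x left) 0
            = psum L (RB L x left + 1) - psum L left by rw [psum_succ L _ hlt]; ring] at hle
      have := (hchar.2 (RB L x left + 1) (by omega)).mp (by omega)
      have hmax : bval L x left - 1 ≤ RB L x left := by unfold RB; omega
      omega
    rw [aWhile, dif_neg hcond]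
  | succ k ih =>
    intro re hk h1 h2
    by_cases hre : re = RB L x left
    · exact ih re (by omega) h1 h2
    · have hre2 : re < RB L x left := by omega
      have hreb : re + 1 ≤ bval L x left - 1 := by
        have h' := hre2
        unfold RB at h'
        omega
      have hrelt : re < L.length := by omega
      have hcond : psum L re - psum L left + L.getD re 0 ≤ x := by
        rw [show psum L re - psum L left + L.getD re 0
              = psum L (re + 1) - psum L left by rw [psum_succ L _ hrelt]; ring]
        have := (hchar.2 (re + 1) (by omega)).mpr (by omega)
        omega
      rw [aWhile, dif_pos ⟨hrelt, hcond⟩]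
      rw [show psum L re - psum L left + L.getD re 0
            = psum L (re + 1) - psum L left by rw [psum_succ L _ hrelt]; ring]
      exact ih (re + 1) (by omega) (by omega) (by omega)

theorem loop_eq (L : List Int) (x : Int) (hPre : ∀ a ∈ L, 0 ≤ a) :
    ∀ (k left : Nat), left + k = L.length →
    ∀ (cnt mw : Int) (ivs : List (Int × Int)) (re : Nat),
    left ≤ re → re ≤ RB L x left →
    (let r := (List.range' left k).foldl (aStep L x L.length)
        (cnt, mw, ivs, re, psum L re - psum L left);
      (r.1, r.2.1, r.2.2.1))
      = (List.range' left k).foldl (bStep L.length (prefixFrom 0 L) x) (cnt, mw, ivs) := by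
  intro k
  induction k with
  | zero => intro left h cnt mw ivs re h1 h2; simp
  | succ k ih =>
    intro left h cnt mw ivs re h1 h2
    have hleft : left < L.length := by omega
    have hW := aWhile_eq L x hPre left hleft (RB L x left - re) re (by omega) h1 h2
    have hRBge : left ≤ RB L x left := by unfold RB; omega
    have hRBn : RB L x left ≤ L.length := RB_le L x hPre left hleft
    have hre_eq : max left (bval L x left - 1) = RB L x left := rfl
    rw [List.range'_succ]
    simp only [List.foldl_cons]
    have hstep : aStep L x L.length (cnt, mw, ivs, re, psum L re - psum L left) left
        = (let size : Int := ((RB L x left : Int) - (left : Int));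
           let cnt' := cnt + size;
           let mw' := if mw < size then size else mw;
           let ivs' := if mw < size then [((left : Int), ((RB L x left : Nat) : Int))]
                       else if mw = size then ivs ++ [((left : Int), ((RB L x left : Nat) : Int))]
                       else ivs;
           if RB L x left = left then (cnt', mw', ivs', RB L x left + 1, psum L (RB L x left) - psum L left)
           else (cnt', mw', ivs', RB L x left, psum L (RB L x left) - psum L left - L.getD left 0)) := by
      simp only [aStep, hW]
    have hbstep : bStep L.length (prefixFrom 0 L) x (cnt, mw, ivs) left
        = (let size : Int := ((RB L x left : Int) - (left : Int));
           (cnt + size, (if mw < size then size else mw),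
             (if mw < size then [((left : Int), ((RB L x left : Nat) : Int))]
              else if mw = size then ivs ++ [((left : Int), ((RB L x left : Nat) : Int))]
              else ivs))) := rfl
    rw [hstep, hbstep]
    by_cases hcase : RB L x left = left
    · simp only [hcase, if_true]
      have hs : psum L left - psum L left = psum L (left + 1) - psum L (left + 1) := by ring
      rw [hs]
      exact ih (left + 1) (by omega) _ _ _ (left + 1) (le_refl _)
        (by unfold RB; omega)
    · simp only [hcase, if_false]
      have hs : psum L (RB L x left) - psum L left - L.getD left 0
          = psum L (RB L x left) - psum L (left + 1) := by
        rw [psum_succ L left hleft]; ring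
      rw [hs]
      exact ih (left + 1) (by omega) _ _ _ (RB L x left) (by omega)
        (le_trans (RB_mono L x hPre left (by omega)) (le_refl _))

-- ===== VERDICT (by name: the statement is the Claim_ definition above) =====
theorem intervals_lt_x_spec : Claim_equal_intervals_lt_x := by
  intro L x _hDom hPre
  unfold Spec_intervals_lt_x intervals_lt_x intervals_lt_x_alt
  simp only [List.range_eq_range']
  have h0 : psum L 0 - psum L 0 = 0 := by ring
  have := loop_eq L x hPre L.length 0 (by omega) 0 0 [] 0 (le_refl _) (by unfold RB; omega)
  rw [h0] at this
  exact this
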